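-- pv_equiv track=rewrite | github.com/Bikatr7/AdventOfCode | solutions/2024/8/8.py | prs
-- ===== SOURCE A (Python) =====
-- def prs(d):
--     g=[list(l) for l in d.splitlines()]
--     a={}
--     for y in range(len(g)):
--         for x in range(len(g[0])):
--             if(g[y][x]!='.'):
--                 if(g[y][x] not in a):
--                     a[g[y][x]]=[]
--                 a[g[y][x]].append((x,y))
--     return a,len(g),len(g[0])
-- ===== SOURCE B (Python) =====
-- def prs(d):
--     g = d.splitlines()
--     rows = len(g)
--     cols = len(g[0])
--     cells = [(l[x], (x, y)) for y, l in enumerate(g) for x in range(cols)]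
--     cells = [t for t in cells if t[0] != '.']
--     keys = list(dict.fromkeys(c for c, _ in cells))
--     return ({c: [p for cc, p in cells if cc == c] for c in keys}, rows, cols)
-- ===== Notes on version B (the rewrite author's own statement) =====
-- stated objective: alternative
-- what changed: Replaced A's incremental dict-insertion double loop with a two-phase collect-then-group pass: build a flat list of (char,(x,y)) cells in scan order, take the first-occurrence-ordered distinct chars, and build each key's list by filtering the flat list.
import Mathlib
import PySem

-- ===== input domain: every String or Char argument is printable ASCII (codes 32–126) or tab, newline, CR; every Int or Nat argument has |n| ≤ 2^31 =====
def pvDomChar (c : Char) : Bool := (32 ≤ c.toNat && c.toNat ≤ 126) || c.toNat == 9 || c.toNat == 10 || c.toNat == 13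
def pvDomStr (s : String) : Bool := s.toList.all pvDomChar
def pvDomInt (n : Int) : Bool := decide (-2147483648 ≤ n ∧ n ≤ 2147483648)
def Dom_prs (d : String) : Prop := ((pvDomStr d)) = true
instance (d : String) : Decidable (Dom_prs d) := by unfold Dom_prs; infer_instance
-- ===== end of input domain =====

-- B replaces A's incremental dict-insertion double loop by a collect-then-group pass
-- (flat cell list, first-occurrence keys, one filtering pass per key); objective: alternative decomposition.

-- ===== PORT A =====
def prs (d : String) : (List (String × List (Int × Int))) × Int × Int :=
  let g : List (List Char) := (PySem.Str.splitlines d).map String.toList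
  let a : PySem.Dict String (List (Int × Int)) :=
    (PySem.List.pyRange 0 g.length).foldl (fun a y =>
      (PySem.List.pyRange 0 (PySem.List.pyGetD g 0 []).length).foldl (fun a x =>
        let c := PySem.List.pyGetD (PySem.List.pyGetD g y []) x '.'
        if c == '.' then a
        else a.modify (String.ofList [c]) [] (fun v => v ++ [(x, y)])) a) PySem.Dict.empty
  (a.items, (g.length : Int), ((PySem.List.pyGetD g 0 []).length : Int))

-- ===== PORT B =====
def prs_alt (d : String) : (List (String × List (Int × Int))) × Int × Int :=
  let g : List (List Char) := (PySem.Str.splitlines d).map String.toList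
  let rows : Int := g.length
  let cols : Int := (PySem.List.pyGetD g 0 []).length
  let cells0 : List (String × Int × Int) :=
    (PySem.List.enumerate g).flatMap (fun yl =>
      (PySem.List.pyRange 0 cols).map (fun x =>
        (String.ofList [PySem.List.pyGetD yl.2 x '.'], x, yl.1)))
  let cells := cells0.filter (fun t => t.1 != ".")
  let keys := PySem.List.dedup (cells.map (·.1))
  (keys.map (fun c => (c, (cells.filter (fun t => t.1 == c)).map (·.2))), rows, cols)

-- ===== PRECONDITION & SPEC =====
-- Pre_ excludes exactly the inputs on which the Python A raises IndexError:
-- an empty grid (len(g[0]) on no lines) or some line shorter than the first line.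
def Pre_prs (d : String) : Prop :=
  let g := (PySem.Str.splitlines d).map String.toList
  g ≠ [] ∧ ∀ l ∈ g, (g.headD []).length ≤ l.length
instance (d : String) : Decidable (Pre_prs d) := by unfold Pre_prs; infer_instance

def pvWitness_prs : String := "a.b\n.a."

def Spec_prs (d : String) (out : (List (String × List (Int × Int))) × Int × Int) : Prop := out = prs_alt d
instance (d : String) (out : (List (String × List (Int × Int))) × Int × Int) : Decidable (Spec_prs d out) := by unfold Spec_prs; infer_instance

-- ===== CLAIM (what is proved, stated in full; the proofs are below) =====
def Claim_equal_prs : Prop := ∀ (d : String), Dom_prs d → Pre_prs d → Spec_prs d (prs d)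

-- ===== LEMMAS AND PROOFS =====

-- the common grouping step: d[k].append(p) with default []
def prsStep (d : PySem.Dict String (List (Int × Int))) (p : String × Int × Int) :
    PySem.Dict String (List (Int × Int)) :=
  d.modify p.1 [] (fun v => v ++ [p.2])

theorem ofList_singleton_beq_dot (c : Char) :
    (String.ofList [c] == ".") = (c == '.') := by
  by_cases h : c = '.'
  · subst h; rfl
  · have h1 : (c == '.') = false := by simp [h]
    have h2 : (String.ofList [c] == ".") = false := by
      simp only [beq_eq_false_iff_ne, ne_eq]
      intro hc
      exact h (by simpa using congrArg String.toList hc)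
    rw [h1, h2]

-- one row of A's inner loop, written as a fold of prsStep over the row's filtered cells
theorem prs_inner_row (l : List Char) (y : Int) (xs : List Int)
    (a : PySem.Dict String (List (Int × Int))) :
    xs.foldl (fun a x =>
        let c := PySem.List.pyGetD l x '.'
        if c == '.' then a
        else a.modify (String.ofList [c]) [] (fun v => v ++ [(x, y)])) a
      = ((xs.map (fun x => (String.ofList [PySem.List.pyGetD l x '.'], x, y))).filter
          (fun t => t.1 != ".")).foldl prsStep a := by
  induction xs generalizing a with
  | nil => rfl
  | cons x xs ih =>
    simp only [List.foldl_cons, List.map_cons, List.filter_cons, bne,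
      ofList_singleton_beq_dot]
    by_cases h : PySem.List.pyGetD l x '.' = '.'
    · simp only [h, beq_self_eq_true, if_true, Bool.not_true, Bool.false_eq_true, if_false]
      exact ih a
    · have hb : (PySem.List.pyGetD l x '.' == '.') = false := by simp [h]
      simp only [hb, Bool.false_eq_true, if_false, Bool.not_false, if_true, List.foldl_cons]
      exact ih _

-- folding over a flatMap = nested folds
theorem foldl_flatMap_step {β : Type} (r : β → List (String × Int × Int)) (ys : List β)
    (a : PySem.Dict String (List (Int × Int))) :
    (ys.flatMap r).foldl prsStep a = ys.foldl (fun a y => (r y).foldl prsStep a) a := by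
  induction ys generalizing a with
  | nil => rfl
  | cons y ys ih => simp [List.flatMap_cons, List.foldl_append, ih]

theorem prs_spec_aux : ∀ (d : String), prs d = prs_alt d := by
  intro d
  unfold prs prs_alt
  simp only []
  set g : List (List Char) := (PySem.Str.splitlines d).map String.toList with hg
  set cols : Nat := (PySem.List.pyGetD g 0 []).length with hcols
  -- B's flat (filtered) cell list
  set cells : List (String × Int × Int) :=
    (((PySem.List.enumerate g).flatMap (fun yl =>
      (PySem.List.pyRange 0 (cols : Int)).map (fun x =>
        (String.ofList [PySem.List.pyGetD yl.2 x '.'], x, yl.1)))).filter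
        (fun t => t.1 != ".")) with hcells
  -- A's dict is the prsStep fold over cells
  have hfun : (fun (a : PySem.Dict String (List (Int × Int))) (y : Int) =>
      (PySem.List.pyRange 0 (cols : Int)).foldl (fun a x =>
        let c := PySem.List.pyGetD (PySem.List.pyGetD g y []) x '.'
        if c == '.' then a
        else a.modify (String.ofList [c]) [] (fun v => v ++ [(x, y)])) a)
      = (fun a y =>
        (((PySem.List.pyRange 0 (cols : Int)).map (fun x =>
          (String.ofList [PySem.List.pyGetD (PySem.List.pyGetD g y []) x '.'], x, y))).filter
          (fun t => t.1 != ".")).foldl prsStep a) := by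
    funext a y
    exact prs_inner_row (PySem.List.pyGetD g y []) y _ a
  have hA : (PySem.List.pyRange 0 g.length).foldl (fun a y =>
      (PySem.List.pyRange 0 (cols : Int)).foldl (fun a x =>
        let c := PySem.List.pyGetD (PySem.List.pyGetD g y []) x '.'
        if c == '.' then a
        else a.modify (String.ofList [c]) [] (fun v => v ++ [(x, y)])) a) PySem.Dict.empty
      = cells.foldl prsStep PySem.Dict.empty := by
    have hcell2 : cells = (PySem.List.pyRange 0 g.length).flatMap (fun y =>
        ((PySem.List.pyRange 0 (cols : Int)).map (fun x =>
          (String.ofList [PySem.List.pyGetD (PySem.List.pyGetD g y []) x '.'], x, y))).filter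
          (fun t => t.1 != ".")) := by
      rw [hcells, PySem.List.enumerate_eq_map_pyRange g [], List.flatMap_map,
        List.filter_flatMap]
      simp [PySem.List.len]
    rw [hcell2, foldl_flatMap_step, hfun]
  rw [hA]
  -- now both sides: compare items with the grouped representation
  have hnd : (cells.foldl prsStep PySem.Dict.empty).keys.Nodup := by
    unfold prsStep
    exact PySem.Dict.nodup_keys_foldl_modify_key cells (·.1) []
      (fun _ p => (fun v => v ++ [p.2])) PySem.Dict.empty (by simp)
  have hkeys : (cells.foldl prsStep PySem.Dict.empty).keys
      = PySem.List.dedup (cells.map (·.1)) := by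
    unfold prsStep
    rw [PySem.Dict.keys_foldl_modify_key cells (·.1) [] (fun _ p => (fun v => v ++ [p.2]))]
    rw [PySem.Dict.keys_empty, PySem.Set.update_nil_left, PySem.List.dedup_eq_ofList]
  have hitems : (cells.foldl prsStep PySem.Dict.empty).items
      = (PySem.List.dedup (cells.map (·.1))).map
          (fun c => (c, (cells.filter (fun t => t.1 == c)).map (·.2))) := by
    rw [PySem.Dict.items_eq_map_keys _ hnd [], hkeys]
    refine List.map_congr_left (fun k _ => ?_)
    unfold prsStep
    rw [PySem.Dict.getD_foldl_modify_append cells PySem.Dict.empty k]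
    simp [PySem.Dict.getD_empty]
  rw [hitems]

-- ===== VERDICT (by name: the statement is the Claim_ definition above) =====
theorem prs_spec : Claim_equal_prs := by
  intro d _ _
  unfold Spec_prs
  exact prs_spec_aux d
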